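-- pv_equiv track=rewrite | github.com/doctordesh/abitmighty-palindromes | base_python.py | palindrome_sum
-- ===== SOURCE A (Python) =====
-- def number2base(n, base):
--     digs = "0123456789abcdefghijklmnopqrstuvwxyz"
--     if n == 0:
--         return digs[0]
--     digits = []
--     while n:
--         digits.insert(0, digs[n % base])
--         n = n // base
--     return "".join(digits)
--
-- def palindrome_sum(limit):
--     count = 0
--     total = 0
--     for i in range(0, limit):
--         base22 = number2base(i, 22)
--         if base22 == base22[::-1]:  # [::-1] is array/string reversal magic
--             count += 1
--             total += i
--
--     return (count, total)
-- ===== SOURCE B (Python) =====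
-- def palindrome_sum(limit):
--     # Arithmetic palindrome test: reverse i's base-22 digits numerically
--     # (no string/list construction at all) and compare with i.
--     count = 0
--     total = 0
--     for i in range(limit):
--         rev, n = 0, i
--         while n:
--             rev = rev * 22 + n % 22
--             n //= 22
--         if rev == i:
--             count += 1
--             total += i
--     return (count, total)
-- ===== Notes on version B (the rewrite author's own statement) =====
-- stated objective: faster
-- what changed: Replaces building a base-22 string and comparing it with its slice-reversal by a purely arithmetic digit reversal (rev = rev*22 + n%22) compared with i, so no string/list is ever constructed.
import Mathlib
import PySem

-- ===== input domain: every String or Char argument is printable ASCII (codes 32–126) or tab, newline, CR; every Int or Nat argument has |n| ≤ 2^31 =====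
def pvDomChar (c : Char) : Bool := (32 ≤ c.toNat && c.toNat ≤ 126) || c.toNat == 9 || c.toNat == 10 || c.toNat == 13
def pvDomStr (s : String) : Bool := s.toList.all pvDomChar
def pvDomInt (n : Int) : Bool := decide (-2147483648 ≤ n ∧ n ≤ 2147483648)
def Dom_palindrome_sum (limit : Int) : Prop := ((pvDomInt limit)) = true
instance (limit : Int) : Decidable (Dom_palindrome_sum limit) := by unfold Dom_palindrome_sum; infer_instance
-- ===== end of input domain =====

-- B replaces A's base-22 string building + slice reversal by a purely arithmetic
-- digit reversal compared with i (objective: faster, constant-factor).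

-- ===== PORT A =====
def pvDigs : String := "0123456789abcdefghijklmnopqrstuvwxyz"

-- the while-loop of number2base: while n: digits.insert(0, digs[n % base]); n = n // base
-- (the '0 < n ∧ 1 < base' guard only makes the loop total; every call in palindrome_sum
-- has base = 22 and 0 ≤ n, where it is exactly Python's 'while n')
def pvN2BLoop (n base : Int) (digits : List Char) : List Char :=
  if h : 0 < n ∧ 1 < base then
    pvN2BLoop (PySem.Int.floordiv n base) base
      ((PySem.Str.pyGet? pvDigs (PySem.Int.mod n base)).getD ' ' :: digits)
  else digits
termination_by n.toNat
decreasing_by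
  obtain ⟨h1, h2⟩ := h
  have hn' : n = (n.toNat : Int) := (Int.toNat_of_nonneg (le_of_lt h1)).symm
  have hb' : base = (base.toNat : Int) := (Int.toNat_of_nonneg (by omega)).symm
  have hfd : PySem.Int.floordiv n base = ((n.toNat / base.toNat : Nat) : Int) := by
    conv_lhs => rw [hn', hb']
    exact PySem.Int.floordiv_natCast _ _
  have hlt : n.toNat / base.toNat < n.toNat := Nat.div_lt_self (by omega) (by omega)
  omega

def number2base (n base : Int) : String :=
  if n = 0 then "0"  -- digs[0]
  else String.ofList (pvN2BLoop n base [])  -- "".join(digits)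

def palindrome_sum (limit : Int) : List Int :=
  let r := (PySem.List.pyRange 0 limit 1).foldl
    (fun (st : Int × Int) i =>
      let base22 := number2base i 22
      if base22 = (PySem.Str.slice? base22 none none (-1)).getD "" then  -- base22 == base22[::-1]
        (st.1 + 1, st.2 + i)
      else st) (0, 0)
  [r.1, r.2]

-- ===== PORT B =====
-- the while-loop of B: while n: rev = rev * 22 + n % 22; n //= 22
-- ('0 < n' guard for totality only; n starts at i ≥ 0)
def pvRevLoop (n rev : Int) : Int :=
  if h : 0 < n then
    pvRevLoop (PySem.Int.floordiv n 22) (rev * 22 + PySem.Int.mod n 22)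
  else rev
termination_by n.toNat
decreasing_by
  have hn' : n = (n.toNat : Int) := (Int.toNat_of_nonneg (le_of_lt h)).symm
  have hfd : PySem.Int.floordiv n 22 = ((n.toNat / 22 : Nat) : Int) := by
    conv_lhs => rw [hn']
    exact_mod_cast PySem.Int.floordiv_natCast n.toNat 22
  have hlt : n.toNat / 22 < n.toNat := Nat.div_lt_self (by omega) (by omega)
  omega

def palindrome_sum_alt (limit : Int) : List Int :=
  let r := (PySem.List.pyRange 0 limit 1).foldl
    (fun (st : Int × Int) i =>
      if pvRevLoop i 0 = i then (st.1 + 1, st.2 + i) else st) (0, 0)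
  [r.1, r.2]

-- ===== PRECONDITION & SPEC =====
def Spec_palindrome_sum (limit : Int) (out : List Int) : Prop := out = palindrome_sum_alt limit
instance (limit : Int) (out : List Int) : Decidable (Spec_palindrome_sum limit out) := by unfold Spec_palindrome_sum; infer_instance

-- ===== CLAIM (what is proved, stated in full; the proofs are below) =====
def Claim_equal_palindrome_sum : Prop := ∀ (limit : Int), Dom_palindrome_sum limit → Spec_palindrome_sum limit (palindrome_sum limit)

-- ===== LEMMAS AND PROOFS =====

-- the base-22 digits of n, most significant first (empty for 0)
def pvDigs22 (n : Nat) : List Nat :=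
  if h : n = 0 then [] else pvDigs22 (n / 22) ++ [n % 22]
decreasing_by exact Nat.div_lt_self (Nat.pos_of_ne_zero h) (by omega)

def pvChr (d : Nat) : Char := (pvDigs.toList[d]?).getD ' '

def pvVal (L : List Nat) : Nat := L.foldl (fun a d => a * 22 + d) 0

lemma pvDigs22_lt (n : Nat) : ∀ d ∈ pvDigs22 n, d < 22 := by
  induction n using Nat.strong_induction_on with
  | _ n ih =>
    rw [pvDigs22]
    split
    · simp
    · intro d hd
      rcases List.mem_append.1 hd with h | h
      · exact ih _ (Nat.div_lt_self (Nat.pos_of_ne_zero (by assumption)) (by omega)) d h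
      · simp at h; omega

lemma pvVal_foldl (L : List Nat) (a : Nat) :
    L.foldl (fun a d => a * 22 + d) a = a * 22 ^ L.length + pvVal L := by
  induction L generalizing a with
  | nil => simp [pvVal]
  | cons d L ih =>
    simp only [List.foldl_cons, List.length_cons]
    rw [ih (a * 22 + d)]
    have hv : pvVal (d :: L) = d * 22 ^ L.length + pvVal L := by
      simp only [pvVal, List.foldl_cons, Nat.zero_mul, Nat.zero_add]
      exact ih d
    rw [hv]
    ring

lemma pvVal_cons (d : Nat) (L : List Nat) :
    pvVal (d :: L) = d * 22 ^ L.length + pvVal L := by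
  simp only [pvVal, List.foldl_cons, Nat.zero_mul, Nat.zero_add]
  exact pvVal_foldl L d

lemma pvVal_lt (L : List Nat) (h : ∀ d ∈ L, d < 22) : pvVal L < 22 ^ L.length := by
  induction L with
  | nil => simp [pvVal]
  | cons d L ih =>
    have hv := pvVal_cons d L
    have h1 : pvVal L < 22 ^ L.length := ih (fun x hx => h x (List.mem_cons_of_mem _ hx))
    have h2 : d < 22 := h d List.mem_cons_self
    have : d * 22 ^ L.length + pvVal L < (d + 1) * 22 ^ L.length := by nlinarith
    have h3 : (d + 1) * 22 ^ L.length ≤ 22 * 22 ^ L.length :=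
      Nat.mul_le_mul_right _ (by omega)
    simp only [hv, List.length_cons, pow_succ]
    calc d * 22 ^ L.length + pvVal L < (d + 1) * 22 ^ L.length := this
      _ ≤ 22 * 22 ^ L.length := h3
      _ = 22 ^ L.length * 22 := by ring

lemma pvVal_inj : ∀ (L1 L2 : List Nat), L1.length = L2.length →
    (∀ d ∈ L1, d < 22) → (∀ d ∈ L2, d < 22) → pvVal L1 = pvVal L2 → L1 = L2 := by
  intro L1
  induction L1 with
  | nil => intro L2 hl _ _ _; cases L2 <;> simp_all
  | cons d1 T1 ih =>
    intro L2 hl hb1 hb2 hv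
    cases L2 with
    | nil => simp at hl
    | cons d2 T2 =>
      have hlen : T1.length = T2.length := by simpa using hl
      have e1 := pvVal_cons d1 T1
      have e2 := pvVal_cons d2 T2
      have v1 : pvVal T1 < 22 ^ T1.length :=
        pvVal_lt _ (fun x hx => hb1 x (List.mem_cons_of_mem _ hx))
      have v2 : pvVal T2 < 22 ^ T2.length :=
        pvVal_lt _ (fun x hx => hb2 x (List.mem_cons_of_mem _ hx))
      rw [e1, e2, ← hlen] at hv
      have v2' : pvVal T2 < 22 ^ T1.length := by rw [hlen]; exact v2
      have hd : d1 = d2 := by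
        have g1 : (d1 * 22 ^ T1.length + pvVal T1) / 22 ^ T1.length = d1 := by
          rw [Nat.mul_comm d1, Nat.mul_add_div (Nat.pow_pos (by omega)), Nat.div_eq_of_lt v1]
          omega
        have g2 : (d2 * 22 ^ T1.length + pvVal T2) / 22 ^ T1.length = d2 := by
          rw [Nat.mul_comm d2, Nat.mul_add_div (Nat.pow_pos (by omega)), Nat.div_eq_of_lt v2']
          omega
        rw [← g1, ← g2, hv]
      subst hd
      have ht : pvVal T1 = pvVal T2 := by omega
      have := ih T2 hlen (fun x hx => hb1 x (List.mem_cons_of_mem _ hx))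
        (fun x hx => hb2 x (List.mem_cons_of_mem _ hx)) ht
      rw [this]

lemma pvVal_digs22 (n : Nat) : pvVal (pvDigs22 n) = n := by
  induction n using Nat.strong_induction_on with
  | _ n ih =>
    rw [pvDigs22]
    split
    · simp [pvVal]; omega
    · have hn : n ≠ 0 := by assumption
      have hlt : n / 22 < n := Nat.div_lt_self (Nat.pos_of_ne_zero hn) (by omega)
      have : pvVal (pvDigs22 (n / 22) ++ [n % 22]) = pvVal (pvDigs22 (n / 22)) * 22 + n % 22 := by
        simp [pvVal, List.foldl_append]
      rw [this, ih _ hlt]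
      omega

lemma pvN2BLoop_eq (n : Nat) (acc : List Char) :
    pvN2BLoop (n : Int) 22 acc = (pvDigs22 n).map pvChr ++ acc := by
  induction n using Nat.strong_induction_on generalizing acc with
  | _ n ih =>
    rw [pvN2BLoop]
    by_cases hn : n = 0
    · subst hn; simp [pvDigs22]
    · have hpos : (0 : Int) < (n : Int) := by exact_mod_cast Nat.pos_of_ne_zero hn
      rw [dif_pos ⟨hpos, by omega⟩]
      have hfd : PySem.Int.floordiv (n : Int) 22 = ((n / 22 : Nat) : Int) :=
        PySem.Int.floordiv_natCast n 22
      have hmd : PySem.Int.mod (n : Int) 22 = ((n % 22 : Nat) : Int) :=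
        PySem.Int.mod_natCast n 22
      rw [hfd, hmd, PySem.Str.pyGet?_natCast]
      rw [ih (n / 22) (Nat.div_lt_self (Nat.pos_of_ne_zero hn) (by omega))]
      conv_rhs => rw [pvDigs22, dif_neg hn]
      simp [pvChr]

lemma pvRevLoop_eq (n : Nat) (r : Int) :
    pvRevLoop (n : Int) r
      = (pvDigs22 n).reverse.foldl (fun (a : Int) (d : Nat) => a * 22 + (d : Int)) r := by
  induction n using Nat.strong_induction_on generalizing r with
  | _ n ih =>
    rw [pvRevLoop]
    by_cases hn : n = 0
    · subst hn; simp [pvDigs22]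
    · have hpos : (0 : Int) < (n : Int) := by exact_mod_cast Nat.pos_of_ne_zero hn
      have hfd : PySem.Int.floordiv (n : Int) 22 = ((n / 22 : Nat) : Int) :=
        PySem.Int.floordiv_natCast n 22
      have hmd : PySem.Int.mod (n : Int) 22 = ((n % 22 : Nat) : Int) :=
        PySem.Int.mod_natCast n 22
      rw [dif_pos hpos, hfd, hmd]
      rw [ih (n / 22) (Nat.div_lt_self (Nat.pos_of_ne_zero hn) (by omega))]
      conv_rhs => rw [pvDigs22, dif_neg hn]
      simp

lemma pvFoldl_cast (L : List Nat) (r : Nat) :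
    L.foldl (fun (a : Int) (d : Nat) => a * 22 + (d : Int)) (r : Int)
      = ((L.foldl (fun a d => a * 22 + d) r : Nat) : Int) := by
  induction L generalizing r with
  | nil => simp
  | cons d L ih =>
    simp only [List.foldl_cons]
    have hc : ((r : Int) * 22 + (d : Int)) = ((r * 22 + d : Nat) : Int) := by
      push_cast
      ring
    rw [hc]
    exact ih (r * 22 + d)

lemma pvRevLoop_val (n : Nat) :
    pvRevLoop (n : Int) 0 = ((pvVal (pvDigs22 n).reverse : Nat) : Int) := by
  rw [pvRevLoop_eq n 0]
  simpa [pvVal] using pvFoldl_cast (pvDigs22 n).reverse 0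

lemma pvChr_inj : ∀ d1 < 22, ∀ d2 < 22, pvChr d1 = pvChr d2 → d1 = d2 := by decide

lemma pvMap_chr_inj : ∀ (L1 L2 : List Nat), (∀ d ∈ L1, d < 22) → (∀ d ∈ L2, d < 22) →
    L1.map pvChr = L2.map pvChr → L1 = L2 := by
  intro L1
  induction L1 with
  | nil => intro L2 _ _ h; cases L2 <;> simp_all
  | cons d1 T1 ih =>
    intro L2 h1 h2 h
    cases L2 with
    | nil => simp at h
    | cons d2 T2 =>
      simp only [List.map_cons, List.cons.injEq] at h
      have hd := pvChr_inj d1 (h1 d1 List.mem_cons_self) d2 (h2 d2 List.mem_cons_self) h.1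
      have ht := ih T2 (fun x hx => h1 x (List.mem_cons_of_mem _ hx))
        (fun x hx => h2 x (List.mem_cons_of_mem _ hx)) h.2
      rw [hd, ht]

-- the palindrome tests of A and of B agree on every i = ↑n
lemma pvCond_iff (n : Nat) :
    (number2base (n : Int) 22
        = (PySem.Str.slice? (number2base (n : Int) 22) none none (-1)).getD "")
      ↔ pvRevLoop (n : Int) 0 = (n : Int) := by
  by_cases hn : n = 0
  · subst hn
    simp only [Nat.cast_zero]
    constructor
    · intro _
      rw [pvRevLoop]
      norm_num
    · intro _
      rw [show number2base (0 : Int) 22 = "0" by simp [number2base],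
        PySem.Str.slice?_none_none_neg_one]
      decide
  · have hne : ((n : Int)) ≠ 0 := by exact_mod_cast hn
    set L : List Char := (pvDigs22 n).map pvChr with hL
    have hnb : number2base (n : Int) 22 = String.ofList L := by
      rw [number2base, if_neg hne]
      rw [pvN2BLoop_eq n []]
      simp [hL]
    have hdig := pvDigs22_lt n
    constructor
    · intro h
      rw [hnb, PySem.Str.slice?_none_none_neg_one] at h
      simp only [Option.getD_some, String.toList_ofList] at h
      have hLrev : L = L.reverse := by
        have := congrArg String.toList h
        simpa using this
      have hDrev : pvDigs22 n = (pvDigs22 n).reverse := by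
        apply pvMap_chr_inj _ _ hdig (fun d hd => hdig d (List.mem_reverse.1 hd))
        simpa [hL, List.map_reverse] using hLrev
      rw [pvRevLoop_val n, ← hDrev, pvVal_digs22 n]
    · intro h
      rw [pvRevLoop_val n] at h
      have hv : pvVal (pvDigs22 n).reverse = n := by exact_mod_cast h
      have hDrev : (pvDigs22 n).reverse = pvDigs22 n := by
        apply pvVal_inj _ _ (by simp) (fun d hd => hdig d (List.mem_reverse.1 hd)) hdig
        rw [hv, pvVal_digs22 n]
      rw [hnb, PySem.Str.slice?_none_none_neg_one]
      simp only [Option.getD_some, String.toList_ofList]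
      rw [hL, ← List.map_reverse, hDrev]

-- ===== VERDICT (by name: the statement is the Claim_ definition above) =====
theorem palindrome_sum_spec : Claim_equal_palindrome_sum := by
  intro limit _
  unfold Spec_palindrome_sum palindrome_sum palindrome_sum_alt
  have hfold := PySem.List.foldl_congr_mem (PySem.List.pyRange 0 limit 1)
    (fun (st : Int × Int) i =>
      let base22 := number2base i 22
      if base22 = (PySem.Str.slice? base22 none none (-1)).getD "" then
        (st.1 + 1, st.2 + i)
      else st)
    (fun (st : Int × Int) i =>
      if pvRevLoop i 0 = i then (st.1 + 1, st.2 + i) else st)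
    (0, 0) ?_
  · rw [hfold]
  · intro st i hi
    have h0 : 0 ≤ i := (PySem.List.mem_pyRange_one.1 hi).1
    obtain ⟨n, rfl⟩ : ∃ m : Nat, i = (m : Int) := ⟨i.toNat, (Int.toNat_of_nonneg h0).symm⟩
    by_cases hc : pvRevLoop (n : Int) 0 = (n : Int)
    · simp only [if_pos hc, if_pos ((pvCond_iff n).2 hc)]
    · simp only [if_neg hc, if_neg (fun h => hc ((pvCond_iff n).1 h))]
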